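-- pv_equiv track=rewrite | github.com/MrBrantCode/unitest_baseline | mut_generate/mist_train_taco/taco_2559/solution.py | max_f_value
-- ===== SOURCE A (Python) =====
-- def max_f_value(arr, n):
--     l = 0
--     r = 0
--     f = 0
--     ma = 0
--
--     for num in arr:
--         if num == 1:
--             r += 1
--         elif num == -1:
--             f = 1
--             l = r
--             r = 0
--         if l + r > ma:
--             ma = l + r
--
--     if f == 0:
--         return (0, 1)
--     else:
--         return (ma, 1)
-- ===== SOURCE B (Python) =====
-- def max_f_value(arr, n):
--     counts = [0]
--     saw_split = False
--     for num in arr: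
--         if num == -1:
--             saw_split = True
--             counts.append(0)
--         elif num == 1:
--             counts[-1] += 1
--     if not saw_split:
--         return (0, 1)
--     best = 0
--     prev = counts[0]
--     for c in counts[1:]:
--         if prev + c > best:
--             best = prev + c
--         prev = c
--     return (best, 1)
-- ===== Notes on version B (the rewrite author's own statement) =====
-- stated objective: alternative
-- what changed: Replaces A's fused scan tracking (last-segment count l, current count r, flag f, running max) by two separate passes: first build the list of per-segment 1-counts split at each -1, then take the maximum over adjacent segment-count pairs.
import Mathlib
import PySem

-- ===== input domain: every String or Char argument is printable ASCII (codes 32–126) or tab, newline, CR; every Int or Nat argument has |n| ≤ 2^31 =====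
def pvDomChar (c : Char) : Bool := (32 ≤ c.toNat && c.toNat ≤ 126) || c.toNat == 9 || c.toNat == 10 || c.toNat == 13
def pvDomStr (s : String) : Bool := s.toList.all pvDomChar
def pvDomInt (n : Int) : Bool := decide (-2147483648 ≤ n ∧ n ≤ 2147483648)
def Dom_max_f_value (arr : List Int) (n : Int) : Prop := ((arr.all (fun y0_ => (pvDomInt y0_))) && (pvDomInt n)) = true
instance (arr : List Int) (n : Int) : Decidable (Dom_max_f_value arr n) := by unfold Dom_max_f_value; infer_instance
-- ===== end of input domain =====

-- B is an alternative decomposition: a segment-count table pass followed by an adjacent-pair max pass,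
-- instead of A's fused l/r/f/ma scan.

-- ===== PORT A =====
-- state (l, r, f, ma); one fold step per arr element, as in A's for-loop
def pvAStep (st : Int × Int × Int × Int) (num : Int) : Int × Int × Int × Int :=
  let l := st.1
  let r := st.2.1
  let f := st.2.2.1
  let ma := st.2.2.2
  let (l, r, f) := if num == 1 then (l, r + 1, f)
                   else if num == -1 then (r, 0, (1 : Int))
                   else (l, r, f)
  let ma := if l + r > ma then l + r else ma
  (l, r, f, ma)

def max_f_value (arr : List Int) (n : Int) : Int × Int :=
  let st := arr.foldl pvAStep (0, 0, 0, 0)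
  if st.2.2.1 == 0 then (0, 1) else (st.2.2.2, 1)

-- ===== PORT B =====
-- first pass: counts is kept as (done segments, current segment count); saw_split as in Source B
def pvSegStep (st : List Int × Int × Bool) (num : Int) : List Int × Int × Bool :=
  if num == -1 then (st.1 ++ [st.2.1], 0, true)
  else if num == 1 then (st.1, st.2.1 + 1, st.2.2)
  else st

-- second pass: best = max of prev + c over the tail, as in Source B's loop
def pvPairScan : List Int → Int → Int → Int
  | [], _, best => best
  | c :: rest, prev, best => pvPairScan rest c (if prev + c > best then prev + c else best)

def max_f_value_alt (arr : List Int) (n : Int) : Int × Int :=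
  let st := arr.foldl pvSegStep ([], 0, false)
  if !st.2.2 then (0, 1)
  else
    let counts := st.1 ++ [st.2.1]
    (pvPairScan counts.tail (counts.headD 0) 0, 1)

-- ===== PRECONDITION & SPEC =====
def Spec_max_f_value (arr : List Int) (n : Int) (out : Int × Int) : Prop := out = max_f_value_alt arr n
instance (arr : List Int) (n : Int) (out : Int × Int) : Decidable (Spec_max_f_value arr n out) := by unfold Spec_max_f_value; infer_instance

-- ===== CLAIM (what is proved, stated in full; the proofs are below) =====
def Claim_equal_max_f_value : Prop := ∀ (arr : List Int) (n : Int), Dom_max_f_value arr n → Spec_max_f_value arr n (max_f_value arr n)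

-- ===== LEMMAS AND PROOFS =====

-- proof-side helpers: last element with default 0, and max over adjacent pairs
def pvLastD : List Int → Int
  | [] => 0
  | [x] => x
  | _ :: y :: r => pvLastD (y :: r)

lemma pvLastD_nil : pvLastD [] = 0 := rfl
lemma pvLastD_single (x : Int) : pvLastD [x] = x := rfl
lemma pvLastD_cons2 (x y : Int) (r : List Int) : pvLastD (x :: y :: r) = pvLastD (y :: r) := rfl

lemma pvLastD_concat (xs : List Int) (y : Int) : pvLastD (xs ++ [y]) = y := by
  induction xs with
  | nil => rfl
  | cons x rest ih =>
    cases rest with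
    | nil => rfl
    | cons x2 r2 => simpa using ih

def pvPairMax : List Int → Int
  | c0 :: c1 :: rest => max (c0 + c1) (pvPairMax (c1 :: rest))
  | _ => 0

lemma pvPairMax_single (x : Int) : pvPairMax [x] = 0 := rfl
lemma pvPairMax_cons2 (a b : Int) (l : List Int) :
    pvPairMax (a :: b :: l) = max (a + b) (pvPairMax (b :: l)) := rfl

lemma pvPairScan_eq (xs : List Int) : ∀ prev best, 0 ≤ best →
    pvPairScan xs prev best = max best (pvPairMax (prev :: xs)) := by
  induction xs with
  | nil => intro prev best h; simp [pvPairScan, pvPairMax_single]; omega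
  | cons c rest ih =>
    intro prev best h
    have hm : (if prev + c > best then prev + c else best) = max best (prev + c) := by omega
    rw [pvPairScan, hm, ih c (max best (prev + c)) (by omega), pvPairMax_cons2]
    omega

lemma pvPairMax_append_last (xs : List Int) (y : Int) (h : xs ≠ []) :
    pvPairMax (xs ++ [y]) = max (pvPairMax xs) (pvLastD xs + y) := by
  induction xs with
  | nil => simp at h
  | cons x rest ih =>
    cases rest with
    | nil =>
      simp only [List.cons_append, List.nil_append, pvPairMax_cons2, pvPairMax_single,
        pvLastD_single]
      omega
    | cons x2 r2 =>
      have hrec := ih (by simp)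
      simp only [List.cons_append] at hrec ⊢
      rw [pvPairMax_cons2, hrec, pvPairMax_cons2, pvLastD_cons2]
      omega

lemma pvLastD_nonneg (xs : List Int) (h : ∀ x ∈ xs, 0 ≤ x) : 0 ≤ pvLastD xs := by
  induction xs with
  | nil => simp [pvLastD_nil]
  | cons x rest ih =>
    cases rest with
    | nil => simpa [pvLastD_single] using h x (by simp)
    | cons y r =>
      rw [pvLastD_cons2]
      exact ih (fun z hz => h z (by simp [hz]))

-- the coupling invariant between A's fold state and B's first-pass state
lemma pvFold_rel (arr : List Int) : ∀ (acc : List Int) (cur : Int),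
    0 ≤ cur → (∀ x ∈ acc, 0 ≤ x) →
    arr.foldl pvAStep (pvLastD acc, cur, (if acc.isEmpty then 0 else 1),
        max cur (pvPairMax (acc ++ [cur])))
      = (fun (st : List Int × Int × Bool) =>
          ((pvLastD st.1 : Int), st.2.1, (if st.1.isEmpty then (0 : Int) else 1),
            max st.2.1 (pvPairMax (st.1 ++ [st.2.1]))))
        (arr.foldl pvSegStep (acc, cur, !acc.isEmpty)) := by
  induction arr with
  | nil => intro acc cur _ _; rfl
  | cons num rest ih =>
    intro acc cur hcur hacc
    simp only [List.foldl_cons]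
    by_cases h1 : num = -1
    · -- split: acc grows, cur resets
      have hstepA : pvAStep (pvLastD acc, cur, (if acc.isEmpty then 0 else 1),
          max cur (pvPairMax (acc ++ [cur]))) num
          = (pvLastD (acc ++ [cur]), 0, (if (acc ++ [cur]).isEmpty then (0:Int) else 1),
             max (0:Int) (pvPairMax ((acc ++ [cur]) ++ [0]))) := by
        have hne : acc ++ [cur] ≠ [] := by simp
        rw [pvPairMax_append_last (acc ++ [cur]) 0 hne]
        simp [pvAStep, h1, pvLastD_concat]
        omega
      have hstepB : pvSegStep (acc, cur, !acc.isEmpty) num = (acc ++ [cur], 0, true) := by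
        simp [pvSegStep, h1]
      rw [hstepA]; simp only [hstepB]
      have hrec := ih (acc ++ [cur]) 0 (le_refl 0)
        (by intro x hx; rcases List.mem_append.mp hx with hm | hm
            · exact hacc x hm
            · simp at hm; omega)
      rw [show (!(acc ++ [cur]).isEmpty) = true from by simp] at hrec
      exact hrec
    · by_cases h2 : num = 1
      · -- count: cur increments
        have hlast : 0 ≤ pvLastD acc := pvLastD_nonneg acc hacc
        have hstepA : pvAStep (pvLastD acc, cur, (if acc.isEmpty then 0 else 1),
            max cur (pvPairMax (acc ++ [cur]))) num
            = (pvLastD acc, cur + 1, (if acc.isEmpty then (0:Int) else 1),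
               max (cur + 1) (pvPairMax (acc ++ [cur + 1]))) := by
          by_cases hE : acc = []
          · subst hE
            simp [pvAStep, h2, pvPairMax_single, pvLastD_nil]
            omega
          · rw [show pvPairMax (acc ++ [cur]) = max (pvPairMax acc) (pvLastD acc + cur) from
                  pvPairMax_append_last acc cur hE,
                show pvPairMax (acc ++ [cur + 1]) = max (pvPairMax acc) (pvLastD acc + (cur + 1)) from
                  pvPairMax_append_last acc (cur + 1) hE]
            simp [pvAStep, h2]
            omega
        have hstepB : pvSegStep (acc, cur, !acc.isEmpty) num = (acc, cur + 1, !acc.isEmpty) := by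
          simp [pvSegStep, h1, h2]
        rw [hstepA]; simp only [hstepB]
        exact ih acc (cur + 1) (by omega) hacc
      · -- other values: no change in either state
        have hlast : 0 ≤ pvLastD acc := pvLastD_nonneg acc hacc
        have hstepA : pvAStep (pvLastD acc, cur, (if acc.isEmpty then 0 else 1),
            max cur (pvPairMax (acc ++ [cur]))) num
            = (pvLastD acc, cur, (if acc.isEmpty then (0:Int) else 1),
               max cur (pvPairMax (acc ++ [cur]))) := by
          by_cases hE : acc = []
          · subst hE
            simp [pvAStep, h1, h2, pvPairMax_single, pvLastD_nil]
          · rw [show pvPairMax (acc ++ [cur]) = max (pvPairMax acc) (pvLastD acc + cur) from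
                  pvPairMax_append_last acc cur hE]
            simp [pvAStep, h1, h2]
        have hstepB : pvSegStep (acc, cur, !acc.isEmpty) num = (acc, cur, !acc.isEmpty) := by
          simp [pvSegStep, h1, h2]
        rw [hstepA]; simp only [hstepB]
        exact ih acc cur hcur hacc

-- B's first-pass state keeps all counts nonnegative
lemma pvSeg_nonneg (arr : List Int) : ∀ (acc : List Int) (cur : Int) (saw : Bool),
    0 ≤ cur → (∀ x ∈ acc, 0 ≤ x) →
    (0 ≤ (arr.foldl pvSegStep (acc, cur, saw)).2.1 ∧
     ∀ x ∈ (arr.foldl pvSegStep (acc, cur, saw)).1, 0 ≤ x) := by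
  induction arr with
  | nil => intro acc cur saw h1 h2; exact ⟨h1, h2⟩
  | cons num rest ih =>
    intro acc cur saw h1 h2
    simp only [List.foldl_cons, pvSegStep]
    split_ifs with hA hB
    · exact ih _ _ _ (le_refl 0)
        (by intro x hx; rcases List.mem_append.mp hx with hm | hm
            · exact h2 x hm
            · simp at hm; omega)
    · exact ih _ _ _ (by omega) h2
    · exact ih _ _ _ h1 h2

-- B's flag equals "acc nonempty" when started that way
lemma pvSeg_flag (arr : List Int) : ∀ (acc : List Int) (cur : Int),
    (arr.foldl pvSegStep (acc, cur, !acc.isEmpty)).2.2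
      = !(arr.foldl pvSegStep (acc, cur, !acc.isEmpty)).1.isEmpty := by
  induction arr with
  | nil => intro acc cur; rfl
  | cons num rest ih =>
    intro acc cur
    simp only [List.foldl_cons, pvSegStep]
    split_ifs with hA hB
    · have hrec := ih (acc ++ [cur]) 0
      rw [show (!(acc ++ [cur]).isEmpty) = true from by simp] at hrec
      exact hrec
    · exact ih acc (cur + 1)
    · exact ih acc cur

-- ===== VERDICT (by name: the statement is the Claim_ definition above) =====
theorem max_f_value_spec : Claim_equal_max_f_value := by
  intro arr n _
  unfold Spec_max_f_value
  simp only [max_f_value, max_f_value_alt]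
  have hrel := pvFold_rel arr [] 0 (le_refl 0) (by simp)
  have hflag := pvSeg_flag arr [] 0
  have hnn := pvSeg_nonneg arr [] 0 false (le_refl 0) (by simp)
  simp only [List.isEmpty_nil, Bool.not_true, pvLastD_nil, List.nil_append,
    pvPairMax_single, if_true, max_self] at hrel hflag hnn
  rcases hsplit : arr.foldl pvSegStep ([], 0, false) with ⟨acc', cur', saw'⟩
  rw [hsplit] at hrel hflag hnn
  simp only at hrel hflag hnn
  rw [hrel]
  simp only [hflag]
  by_cases hE : acc'.isEmpty
  · simp [hE]
  · have hne : acc' ≠ [] := by simpa [List.isEmpty_iff] using hE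
    have hlast : 0 ≤ pvLastD acc' := pvLastD_nonneg acc' hnn.2
    have hcur : 0 ≤ cur' := hnn.1
    have happ := pvPairMax_append_last acc' cur' hne
    have hma : max cur' (pvPairMax (acc' ++ [cur'])) = pvPairMax (acc' ++ [cur']) := by
      rw [happ]; omega
    simp only [hE, Bool.not_false, hma]
    norm_num
    obtain ⟨c0, cs, hc⟩ : ∃ c0 cs, acc' = c0 :: cs := by
      cases acc' with
      | nil => exact absurd rfl hne
      | cons a b => exact ⟨a, b, rfl⟩
    subst hc
    simp only [List.cons_append, List.tail_cons]
    rw [show ((c0 :: cs).head?.getD cur' : Int) = c0 from rfl,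
        pvPairScan_eq (cs ++ [cur']) c0 0 (le_refl 0)]
    have hposmax : 0 ≤ pvPairMax (c0 :: (cs ++ [cur'])) := by
      have h2 := pvPairMax_append_last (c0 :: cs) cur' (by simp)
      have h3 : 0 ≤ pvLastD (c0 :: cs) := pvLastD_nonneg _ hnn.2
      simp only [List.cons_append] at h2
      omega
    omega
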